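-- pv_equiv track=rewrite | github.com/Darmo117/Codewars | Unfinished/Recursive ASCII Fractals/solution.py | fractalize
-- ===== SOURCE A (Python) =====
-- def fractalize(seed: list[str], size: int) -> list[str]:
--     h = len(seed)
--     w = len(seed[0])
--     rows = []
--     for r in range(h ** size):
--         row = ''
--         for c in range(w ** size):
--             filled = True
--             for i in range(size, 0, -1):
--                 if seed[r // (h ** (size - i)) % h][c // (w ** (size - i)) % w] == '.':
--                     filled = False
--                     break
--             if filled:
--                 row += '*'
--             else:
--                 row += '.'
--         rows.append(row)
--     return rows
-- ===== SOURCE B (Python) =====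
-- def fractalize(seed: list[str], size: int) -> list[str]:
--     # Level-by-level substitution: each pass replaces every seed cell by the
--     # previous grid (for a non-'.' cell) or a blank block (for a '.' cell).
--     w = len(seed[0])
--     grid = ['*']
--     for _ in range(size):
--         grid = [''.join(block_row if row[c] != '.' else '.' * len(block_row)
--                         for c in range(w))
--                 for row in seed for block_row in grid]
--     return grid
-- ===== Notes on version B (the rewrite author's own statement) =====
-- stated objective: alternative
-- what changed: Instead of deciding each of the H^size*W^size output cells by an inner loop over all size digit levels, B builds the fractal bottom-up by size substitution passes, each pass pasting the previous grid (or a blank block) into every seed cell.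
import Mathlib
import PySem

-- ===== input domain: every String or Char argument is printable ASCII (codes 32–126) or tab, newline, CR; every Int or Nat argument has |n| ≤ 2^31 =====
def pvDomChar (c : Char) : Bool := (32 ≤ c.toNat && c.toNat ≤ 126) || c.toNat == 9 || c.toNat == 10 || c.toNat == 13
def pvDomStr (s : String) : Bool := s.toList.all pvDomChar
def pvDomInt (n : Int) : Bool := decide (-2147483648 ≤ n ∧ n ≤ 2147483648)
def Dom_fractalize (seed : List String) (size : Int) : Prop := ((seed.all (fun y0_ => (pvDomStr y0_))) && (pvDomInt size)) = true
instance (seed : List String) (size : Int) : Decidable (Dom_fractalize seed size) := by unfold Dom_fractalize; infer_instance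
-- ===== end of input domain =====

-- B replaces A's per-cell loop over all `size` digit levels by `size` bottom-up block-substitution
-- passes (the previous grid pasted into each non-'.' seed cell), a different algorithm of the same output.

-- ===== PORT A =====
-- the inner `for i in range(size, 0, -1): … break` loop of A, with its early exit
def fractalizeCheck (seed : List String) (h w : Nat) (size : Int) (r c : Nat) : List Int → Bool
  | [] => true
  | i :: rest =>
    -- seed[r // (h ** (size - i)) % h][c // (w ** (size - i)) % w]; within the loop
    -- 0 ≤ size - i, and r, c, h, w are nonnegative, so Nat `/`, `%`, `^` agree with Python
    if (seed.getD (r / h ^ (size - i).toNat % h) "").toList.getD (c / w ^ (size - i).toNat % w) ' ' = '.' then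
      false
    else
      fractalizeCheck seed h w size r c rest

def fractalize (seed : List String) (size : Int) : List String :=
  let h := seed.length
  let w := (seed.headD "").toList.length   -- len(seed[0]); Pre_ excludes the empty seed, where Python raises
  -- range(h ** size): Pre_ gives 0 ≤ size, so `size.toNat` is exact
  (List.range (h ^ size.toNat)).foldl (fun rows r =>
    let row := (List.range (w ^ size.toNat)).foldl (fun row c =>
      let filled := fractalizeCheck seed h w size r c (PySem.List.pyRange size 0 (-1))
      if filled then row ++ "*" else row ++ ".") ""
    rows ++ [row]) []

-- ===== PORT B =====
def fractalize_alt (seed : List String) (size : Int) : List String :=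
  let w := (seed.headD "").toList.length
  (List.range size.toNat).foldl (fun grid _ =>
    seed.flatMap (fun row =>
      grid.map (fun block_row =>
        -- ''.join(block_row if row[c] != '.' else '.' * len(block_row) for c in range(w))
        PySem.Str.join "" ((List.range w).map (fun c =>
          if row.toList.getD c ' ' ≠ '.' then block_row
          else String.ofList (List.replicate block_row.toList.length '.'))))))   -- '.' * len(block_row)
    ["*"]

-- ===== PRECONDITION & SPEC =====
-- Pre_ excludes exactly the inputs where Python A raises: the empty seed (IndexError on seed[0]),
-- a negative size (range(h ** size) on a float, TypeError), and, when size ≥ 1 — the only case in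
-- which A indexes into the rows — a row shorter than the first row (IndexError).
def Pre_fractalize (seed : List String) (size : Int) : Prop :=
  seed ≠ [] ∧ 0 ≤ size ∧
    (1 ≤ size → ∀ s ∈ seed, (seed.headD "").toList.length ≤ s.toList.length)
instance (seed : List String) (size : Int) : Decidable (Pre_fractalize seed size) := by
  unfold Pre_fractalize; infer_instance
def pvWitness_fractalize : List String × Int := (["*.", ".*"], 2)
def Spec_fractalize (seed : List String) (size : Int) (out : List String) : Prop := out = fractalize_alt seed size
instance (seed : List String) (size : Int) (out : List String) : Decidable (Spec_fractalize seed size out) := by unfold Spec_fractalize; infer_instance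

-- ===== CLAIM (what is proved, stated in full; the proofs are below) =====
def Claim_equal_fractalize : Prop := ∀ (seed : List String) (size : Int), Dom_fractalize seed size → Pre_fractalize seed size → Spec_fractalize seed size (fractalize seed size)

-- ===== LEMMAS AND PROOFS =====

-- the character A reads at seed[r][c] (with the ports' out-of-range defaults)
def cellChar (seed : List String) (r c : Nat) : Char :=
  (seed.getD r "").toList.getD c ' '

-- cell (r, c) of the size-n fractal is filled iff every base-(h, w) digit pair points at a non-'.' seed cell
def gcell (seed : List String) (h w n r c : Nat) : Bool :=
  (List.range n).all (fun j => !(cellChar seed (r / h ^ j % h) (c / w ^ j % w) == '.'))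

-- the common normal form of both ports
def specGrid (seed : List String) (h w n : Nat) : List String :=
  (List.range (h ^ n)).map (fun r =>
    String.ofList ((List.range (w ^ n)).map (fun c => if gcell seed h w n r c then '*' else '.')))

lemma allCongr {α : Type} {l : List α} {p q : α → Bool} (h : ∀ x ∈ l, p x = q x) :
    l.all p = l.all q := by
  induction l with
  | nil => rfl
  | cons x t ih => simp_all [List.all_cons]

lemma flatMapCongr {α β : Type} {l : List α} {f g : α → List β} (h : ∀ x ∈ l, f x = g x) :
    l.flatMap f = l.flatMap g := by
  induction l with
  | nil => rfl
  | cons x t ih => simp_all [List.flatMap_cons]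

lemma map_range_mul {α : Type} (F : Nat → α) (a b : Nat) :
    (List.range (a * b)).map F
      = (List.range a).flatMap (fun i => (List.range b).map (fun j => F (i * b + j))) := by
  induction a with
  | zero => simp
  | succ n ih =>
    rw [Nat.succ_mul, List.range_add, List.map_append, ih, List.range_succ,
      List.flatMap_append]
    simp

lemma flatMap_getD {α β : Type} (d : α) (g : α → List β) :
    ∀ (l : List α), l.flatMap g = (List.range l.length).flatMap (fun i => g (l.getD i d)) := by
  intro l
  induction l with
  | nil => simp
  | cons x t ih =>
    rw [List.flatMap_cons, ih, List.length_cons, List.range_succ_eq_map,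
      List.flatMap_cons, List.flatMap_map]
    simp

lemma foldl_str_append {α : Type} (t : α → String) :
    ∀ (L : List α) (acc : String),
      (L.foldl (fun r c => r ++ t c) acc).toList = acc.toList ++ L.flatMap (fun c => (t c).toList) := by
  intro L
  induction L with
  | nil => simp
  | cons x xs ih => intro acc; simp [List.foldl_cons, ih]

lemma join_nil_flatten (l : List (List Char)) : PySem.Chars.join [] l = l.flatten := by
  induction l with
  | nil => rfl
  | cons x t ih => cases t <;> simp_all [PySem.Chars.join, List.intercalate, List.intersperse]

-- the break-loop is an `all`
lemma fractalizeCheck_eq_all (seed : List String) (h w : Nat) (size : Int) (r c : Nat) :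
    ∀ (is : List Int), fractalizeCheck seed h w size r c is
      = is.all (fun i => !(cellChar seed (r / h ^ (size - i).toNat % h) (c / w ^ (size - i).toNat % w) == '.')) := by
  intro is
  induction is with
  | nil => rfl
  | cons i rest ih =>
    rw [fractalizeCheck, List.all_cons, ← ih]
    split_ifs with hdot <;> simp_all [cellChar]

lemma check_eq_gcell (seed : List String) (h w : Nat) (n : Nat) (r c : Nat) :
    fractalizeCheck seed h w (n : Int) r c (PySem.List.pyRange (n : Int) 0 (-1))
      = gcell seed h w n r c := by
  rw [fractalizeCheck_eq_all, PySem.List.pyRange_neg_one, List.all_map, gcell]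
  have hn : ((n : Int) - 0).toNat = n := by omega
  rw [hn]
  refine allCongr (fun k hk => ?_)
  have hk' : k < n := List.mem_range.mp hk
  simp

-- digit extraction: low digits of a * m^n + u ignore a; the top digit is a
lemma digit_low (m n j a u : Nat) (hm : 0 < m) (hj : j < n) :
    (a * m ^ n + u) / m ^ j % m = u / m ^ j % m := by
  have hpow : m ^ n = m ^ (n - j - 1) * m * m ^ j := by
    rw [mul_assoc, ← pow_succ', ← pow_add]
    congr 1
    omega
  have h1 : a * m ^ n + u = u + a * (m ^ (n - j - 1) * m) * m ^ j := by
    rw [hpow]; ring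
  rw [h1, Nat.add_mul_div_right _ _ (Nat.pow_pos hm), ← mul_assoc,
    Nat.add_mul_mod_self_right]

lemma digit_high (m n a u : Nat) (ha : a < m) (hu : u < m ^ n) :
    (a * m ^ n + u) / m ^ n % m = a := by
  have hm : 0 < m := by omega
  rw [Nat.add_comm, Nat.add_mul_div_right _ _ (Nat.pow_pos hm), Nat.div_eq_of_lt hu,
    Nat.zero_add, Nat.mod_eq_of_lt ha]

-- gcell unfolds one substitution level
lemma gcell_succ (seed : List String) (h w n : Nat) (a u b v : Nat)
    (ha : a < h) (hu : u < h ^ n) (hb : b < w) (hv : v < w ^ n) :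
    gcell seed h w (n + 1) (a * h ^ n + u) (b * w ^ n + v)
      = ((!(cellChar seed a b == '.')) && gcell seed h w n u v) := by
  have hh : 0 < h := by omega
  have hw : 0 < w := by omega
  unfold gcell
  rw [List.range_succ, List.all_append, List.all_cons, List.all_nil,
    digit_high h n a u ha hu, digit_high w n b v hb hv]
  have hcong : (List.range n).all
      (fun j => !(cellChar seed ((a * h ^ n + u) / h ^ j % h) ((b * w ^ n + v) / w ^ j % w) == '.'))
      = (List.range n).all (fun j => !(cellChar seed (u / h ^ j % h) (v / w ^ j % w) == '.')) := by
    refine allCongr (fun j hj => ?_)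
    rw [digit_low h n j a u hh (List.mem_range.mp hj), digit_low w n j b v hw (List.mem_range.mp hj)]
  rw [hcong]
  generalize (List.range n).all (fun j => !(cellChar seed (u / h ^ j % h) (v / w ^ j % w) == '.')) = q
  cases q <;> cases cellChar seed a b == '.' <;> rfl

-- A's output is specGrid
lemma A_eq (seed : List String) (n : Nat) :
    fractalize seed (n : Int) = specGrid seed seed.length (seed.headD "").toList.length n := by
  unfold fractalize specGrid
  simp only [Int.toNat_natCast]
  rw [PySem.List.foldl_append_singleton_eq_map, List.nil_append]
  refine List.map_congr_left (fun r _ => ?_)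
  apply String.toList_inj.mp
  have hbody : ∀ (row : String) (c : Nat),
      (if fractalizeCheck seed seed.length (seed.headD "").toList.length (n : Int) r c
            (PySem.List.pyRange (n : Int) 0 (-1)) then row ++ "*" else row ++ ".")
      = row ++ (if gcell seed seed.length (seed.headD "").toList.length n r c then "*" else ".") := by
    intro row c
    rw [check_eq_gcell]
    exact (apply_ite (row ++ ·) _ "*" ".").symm
  simp only [hbody]
  rw [foldl_str_append]
  simp only [String.toList_ofList, String.toList_empty, List.nil_append]
  have hchar : ∀ c : Nat,
      ((if gcell seed seed.length (seed.headD "").toList.length n r c then ("*" : String) else ".").toList)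
        = [if gcell seed seed.length (seed.headD "").toList.length n r c then '*' else '.'] := by
    intro c; split <;> rfl
  simp only [hchar]
  rw [← List.map_eq_flatMap]

-- one substitution pass of B
def altStep (seed : List String) (w : Nat) (grid : List String) : List String :=
  seed.flatMap (fun row =>
    grid.map (fun block_row =>
      PySem.Str.join "" ((List.range w).map (fun c =>
        if row.toList.getD c ' ' ≠ '.' then block_row
        else String.ofList (List.replicate block_row.toList.length '.')))))

lemma altStep_spec (seed : List String) (n : Nat) :
    altStep seed (seed.headD "").toList.length
        (specGrid seed seed.length (seed.headD "").toList.length n)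
      = specGrid seed seed.length (seed.headD "").toList.length (n + 1) := by
  unfold altStep
  conv_rhs => rw [specGrid, show seed.length ^ (n + 1) = seed.length * seed.length ^ n by ring,
    map_range_mul]
  rw [flatMap_getD "" _ seed]
  refine flatMapCongr (fun a hA => ?_)
  have ha : a < seed.length := List.mem_range.mp hA
  rw [specGrid, List.map_map]
  refine List.map_congr_left (fun u hU => ?_)
  have hu : u < seed.length ^ n := List.mem_range.mp hU
  simp only [Function.comp_apply]
  apply String.toList_inj.mp
  rw [PySem.Str.toList_join]
  simp only [List.map_map, String.toList_ofList, String.toList_empty]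
  rw [join_nil_flatten, List.flatMap_def.symm,
    show (seed.headD "").toList.length ^ (n + 1)
        = (seed.headD "").toList.length * (seed.headD "").toList.length ^ n by ring,
    map_range_mul]
  refine flatMapCongr (fun b hB => ?_)
  have hb : b < (seed.headD "").toList.length := List.mem_range.mp hB
  have hrow : (seed.getD a "").toList.getD b ' ' = cellChar seed a b := rfl
  simp only [Function.comp_apply, hrow]
  by_cases hdot : cellChar seed a b = '.'
  · rw [if_neg (by simp [hdot])]
    simp only [String.toList_ofList, List.length_map, List.length_range]
    refine Eq.symm ?_
    rw [show (List.replicate ((seed.headD "").toList.length ^ n) '.')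
        = (List.range ((seed.headD "").toList.length ^ n)).map (fun _ => '.') by
      rw [List.map_const', List.length_range]]
    refine List.map_congr_left (fun v hV => ?_)
    have hv : v < (seed.headD "").toList.length ^ n := List.mem_range.mp hV
    rw [gcell_succ seed _ _ n a u b v ha hu hb hv]
    simp [hdot]
  · rw [if_pos (by simp [hdot])]
    simp only [String.toList_ofList]
    refine Eq.symm (List.map_congr_left (fun v hV => ?_))
    have hv : v < (seed.headD "").toList.length ^ n := List.mem_range.mp hV
    rw [gcell_succ seed _ _ n a u b v ha hu hb hv]
    simp [hdot]

lemma altIter_spec (seed : List String) :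
    ∀ n : Nat, (List.range n).foldl
        (fun grid _ => altStep seed (seed.headD "").toList.length grid) ["*"]
      = specGrid seed seed.length (seed.headD "").toList.length n := by
  intro n
  induction n with
  | zero => simp [specGrid, gcell]
  | succ m ih =>
    rw [List.range_succ, List.foldl_append, List.foldl_cons, List.foldl_nil, ih, altStep_spec]

lemma B_eq (seed : List String) (n : Nat) :
    fractalize_alt seed (n : Int) = specGrid seed seed.length (seed.headD "").toList.length n := by
  unfold fractalize_alt
  simp only [Int.toNat_natCast]
  exact altIter_spec seed n

-- ===== VERDICT (by name: the statement is the Claim_ definition above) =====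
theorem fractalize_spec : Claim_equal_fractalize := by
  intro seed size _ hpre
  obtain ⟨hne, hsz, -⟩ := hpre
  unfold Spec_fractalize
  obtain ⟨n, rfl⟩ : ∃ n : Nat, size = (n : Int) := ⟨size.toNat, by omega⟩
  rw [A_eq, B_eq seed n]
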